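-- pv_equiv track=rewrite | github.com/Amanverma166/backend_Python | models.py | normalize_branch
-- ===== SOURCE A (Python) =====
-- def normalize_branch(branch: str) -> str:
--     valid_branches = {
--         "Computer Science": ["CSE", "Computer Science", "computer science", "cs"],
--         "Electrical Engineering": ["EEE", "Electrical Engineering", "ee"],
--         "Mechanical Engineering": ["ME", "Mechanical Engineering", "me"],
--         "Civil Engineering": ["CE", "Civil Engineering", "ce"]
--     }
--     for standard_branch, variations in valid_branches.items():
--         if branch.strip().lower() in [v.lower() for v in variations]:
--             return standard_branch
--     raise ValueError("Invalid branch name")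
-- ===== SOURCE B (Python) =====
-- # Two-stage normalization: expand abbreviations to the full lowercase name,
-- # validate against the set of full names, and COMPUTE the canonical form by
-- # title-casing (no alias -> canonical output table at all).
--
-- _ABBREV = {
--     "cse": "computer science", "cs": "computer science",
--     "eee": "electrical engineering", "ee": "electrical engineering",
--     "me": "mechanical engineering",
--     "ce": "civil engineering",
-- }
-- _FULL = {"computer science", "electrical engineering",
--          "mechanical engineering", "civil engineering"}
--
--
-- def normalize_branch(branch: str) -> str:
--     key = branch.strip().lower()
--     key = _ABBREV.get(key, key)
--     if key not in _FULL:
--         raise ValueError("Invalid branch name")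
--     return key.title()
-- ===== Notes on version B (the rewrite author's own statement) =====
-- stated objective: alternative
-- what changed: B never stores the canonical output strings: it expands abbreviations to the full lowercase name, validates against the set of four full names, and computes the canonical form by title-casing the key, instead of A's per-call loop over categories scanning freshly lowercased variation lists.
import Mathlib
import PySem

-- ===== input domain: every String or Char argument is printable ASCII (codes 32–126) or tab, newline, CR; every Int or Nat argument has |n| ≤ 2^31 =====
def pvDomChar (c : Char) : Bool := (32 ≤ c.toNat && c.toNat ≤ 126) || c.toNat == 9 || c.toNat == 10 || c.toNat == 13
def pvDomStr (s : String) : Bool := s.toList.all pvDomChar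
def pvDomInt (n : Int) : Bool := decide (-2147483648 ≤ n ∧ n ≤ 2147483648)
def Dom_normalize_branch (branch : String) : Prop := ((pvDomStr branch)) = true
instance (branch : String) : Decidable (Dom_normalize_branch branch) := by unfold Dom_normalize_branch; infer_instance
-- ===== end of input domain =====

-- B stores no canonical outputs: it expands abbreviations to the full lowercase name,
-- validates against the four full names, and COMPUTES the canonical form by title-casing,
-- instead of A's loop over categories scanning lowercased variation lists; objective:
-- alternative. Both raise on unknown branches, which Pre_ excludes.

-- ===== PORT A =====
-- the dict literal of A, as an insertion-ordered association list
def pvValidBranches : List (String × List String) :=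
  [ ("Computer Science", ["CSE", "Computer Science", "computer science", "cs"])
  , ("Electrical Engineering", ["EEE", "Electrical Engineering", "ee"])
  , ("Mechanical Engineering", ["ME", "Mechanical Engineering", "me"])
  , ("Civil Engineering", ["CE", "Civil Engineering", "ce"]) ]

-- the for-loop with early return; "" marks the `raise ValueError` site (outside Pre_)
def pvLoopA (branch : String) : List (String × List String) → String
  | [] => ""
  | (standard_branch, variations) :: rest =>
      if (variations.map (fun v => PySem.Str.lower v)).contains
           (PySem.Str.lower (PySem.Str.strip branch)) then
        standard_branch
      else pvLoopA branch rest

def normalize_branch (branch : String) : String :=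
  pvLoopA branch pvValidBranches

-- ===== PORT B =====
-- Source B's _ABBREV dict and _FULL set
def pvAbbrev : PySem.Dict String String :=
  PySem.Dict.ofList
  [ ("cse", "computer science"), ("cs", "computer science")
  , ("eee", "electrical engineering"), ("ee", "electrical engineering")
  , ("me", "mechanical engineering")
  , ("ce", "civil engineering") ]

def pvFull : PySem.Set String :=
  PySem.Set.ofList ["computer science", "electrical engineering",
                    "mechanical engineering", "civil engineering"]

-- str.title(), ported by hand (exact on ASCII, where cased = alphabetic):
-- uppercase a letter after a non-letter, lowercase a letter after a letter
def pvTitleChars : Bool → List Char → List Char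
  | _, [] => []
  | prevAlpha, c :: rest =>
      (if prevAlpha then PySem.Chars.lowerChar c else PySem.Chars.upperChar c)
        :: pvTitleChars (PySem.Chars.isalpha c) rest

def pvTitle (s : String) : String :=
  String.ofList (pvTitleChars false s.toList)

-- "" marks the `raise ValueError` site (outside Pre_)
def normalize_branch_alt (branch : String) : String :=
  let key := PySem.Str.lower (PySem.Str.strip branch)
  let key := PySem.Dict.getD pvAbbrev key key
  if PySem.Set.contains pvFull key then pvTitle key else ""

-- ===== PRECONDITION & SPEC =====
-- Pre_ excludes exactly the inputs on which A raises ValueError: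
-- those whose stripped, lowercased form is not one of the known variations.
def Pre_normalize_branch (branch : String) : Prop :=
  PySem.Str.lower (PySem.Str.strip branch) ∈
    ["cse", "computer science", "cs", "eee", "electrical engineering", "ee",
     "me", "mechanical engineering", "ce", "civil engineering"]
instance (branch : String) : Decidable (Pre_normalize_branch branch) := by
  unfold Pre_normalize_branch; infer_instance

def pvWitness_normalize_branch : String := " CSE "

def Spec_normalize_branch (branch : String) (out : String) : Prop := out = normalize_branch_alt branch
instance (branch : String) (out : String) : Decidable (Spec_normalize_branch branch out) := by unfold Spec_normalize_branch; infer_instance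

-- ===== CLAIM =====
def Claim_equal_normalize_branch : Prop := ∀ (branch : String), Dom_normalize_branch branch → Pre_normalize_branch branch → Spec_normalize_branch branch (normalize_branch branch)

-- ===== LEMMAS AND PROOFS =====

-- both ports depend on branch only through its stripped, lowercased key
def pvAofKey (key : String) : String :=
  pvValidBranches.foldr
    (fun p acc => if (p.2.map (fun v => PySem.Str.lower v)).contains key then p.1 else acc) ""

lemma loopA_eq_ofKey (branch : String) (l : List (String × List String)) :
    pvLoopA branch l =
      l.foldr (fun p acc =>
        if (p.2.map (fun v => PySem.Str.lower v)).contains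
             (PySem.Str.lower (PySem.Str.strip branch)) then p.1 else acc) "" := by
  induction l with
  | nil => rfl
  | cons p rest ih => cases p; simp [pvLoopA, ih]

def pvBofKey (key : String) : String :=
  let key := PySem.Dict.getD pvAbbrev key key
  if PySem.Set.contains pvFull key then pvTitle key else ""

set_option maxHeartbeats 2000000 in
lemma key_case (key : String)
    (h : key ∈ ["cse", "computer science", "cs", "eee", "electrical engineering", "ee",
                "me", "mechanical engineering", "ce", "civil engineering"]) :
    pvAofKey key = pvBofKey key := by
  fin_cases h <;> decide

lemma A_key (branch : String) :
    normalize_branch branch = pvAofKey (PySem.Str.lower (PySem.Str.strip branch)) :=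
  loopA_eq_ofKey branch pvValidBranches

lemma B_key (branch : String) :
    normalize_branch_alt branch = pvBofKey (PySem.Str.lower (PySem.Str.strip branch)) := rfl

-- ===== VERDICT =====
theorem normalize_branch_spec : Claim_equal_normalize_branch := by
  intro branch _ hpre
  unfold Spec_normalize_branch
  rw [A_key, B_key]
  exact key_case _ hpre
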